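-- pv_equiv track=rewrite | github.com/LoXewyX/pico-ducky | duckyinpython.py | _getCodeBlock
-- ===== SOURCE A (Python) =====
-- def _isCodeBlock(line):
--     upper = line.upper().strip()
--     return upper.startswith("IF") or upper.startswith("WHILE")
--
-- def _getCodeBlock(linesIter):
--     """Consume linesIter and return the lines up to the matching END_ marker."""
--     code  = []
--     depth = 1
--     for line in linesIter:
--         line = line.strip()
--         if line.upper().startswith("END_"):
--             depth -= 1
--         elif _isCodeBlock(line):
--             depth += 1
--         if depth <= 0:
--             break
--         code.append(line)
--     return code
-- ===== SOURCE B (Python) =====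
-- def _getCodeBlock(linesIter):
--     """Consume linesIter and return the lines up to the matching END_ marker."""
--     it = iter(linesIter)
--
--     def _block(top):
--         out = []
--         for line in it:
--             line = line.strip()
--             if line.upper().startswith("END_"):
--                 if not top:
--                     out.append(line)
--                 return out
--             out.append(line)
--             upper = line.upper()
--             if upper.startswith("IF") or upper.startswith("WHILE"):
--                 out.extend(_block(False))
--         return out
--
--     return _block(True)
-- ===== Notes on version B (the rewrite author's own statement) =====
-- stated objective: alternative
-- what changed: Replaced A's single loop with an integer depth counter by a recursive-descent parser: a helper consumes the shared line stream, recursing on IF/WHILE openers and returning at each END_ (kept unless at top level), flattening the nested blocks in order.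
import Mathlib
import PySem

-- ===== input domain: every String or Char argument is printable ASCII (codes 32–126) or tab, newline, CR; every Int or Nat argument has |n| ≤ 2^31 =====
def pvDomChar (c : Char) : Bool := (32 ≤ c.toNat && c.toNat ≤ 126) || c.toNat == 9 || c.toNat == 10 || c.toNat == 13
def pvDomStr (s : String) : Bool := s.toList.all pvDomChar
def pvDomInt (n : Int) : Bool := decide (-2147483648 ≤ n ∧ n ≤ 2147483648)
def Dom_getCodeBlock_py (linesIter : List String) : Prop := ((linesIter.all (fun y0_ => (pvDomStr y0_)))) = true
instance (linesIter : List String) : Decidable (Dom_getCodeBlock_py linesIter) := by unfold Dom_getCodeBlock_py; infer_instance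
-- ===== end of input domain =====

-- B replaces A's integer depth counter by a recursive-descent helper consuming the shared
-- input suffix (objective: alternative decomposition, same cost).

-- ===== PORT A =====
def isCodeBlock_py (line : String) : Bool :=
  let upper := PySem.Str.strip (PySem.Str.upper line)
  PySem.Str.startswith upper "IF" || PySem.Str.startswith upper "WHILE"

def getCodeBlockGo : List String → List String → Int → List String
  | [], code, _ => code
  | l :: rest, code, depth =>
    let line := PySem.Str.strip l
    let depth' :=
      if PySem.Str.startswith (PySem.Str.upper line) "END_" then depth - 1
      else if isCodeBlock_py line then depth + 1
      else depth
    if depth' ≤ 0 then code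
    else getCodeBlockGo rest (code ++ [line]) depth'

def getCodeBlock_py (linesIter : List String) : List String :=
  getCodeBlockGo linesIter [] 1

-- ===== PORT B =====
-- `blockB lines top` is Source B's `_block(top)` reading from the shared iterator: it returns the
-- collected lines and the UNCONSUMED suffix of the input (the iterator's remaining state).
-- The subtype carries the bound needed for termination of the nested recursive calls.
def blockB : (lines : List String) → Bool → {p : List String × List String // p.2.length ≤ lines.length}
  | [], _ => ⟨([], []), Nat.le_refl 0⟩
  | l :: rest, top =>
    let line := PySem.Str.strip l
    if PySem.Str.startswith (PySem.Str.upper line) "END_" then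
      ⟨(if top then [] else [line], rest), Nat.le_succ _⟩
    else if PySem.Str.startswith (PySem.Str.upper line) "IF"
         || PySem.Str.startswith (PySem.Str.upper line) "WHILE" then
      let r1 := blockB rest false
      let r2 := blockB r1.1.2 top
      ⟨(line :: (r1.1.1 ++ r2.1.1), r2.1.2),
        Nat.le_succ_of_le (Nat.le_trans r2.2 r1.2)⟩
    else
      let r := blockB rest top
      ⟨(line :: r.1.1, r.1.2), Nat.le_succ_of_le r.2⟩
termination_by lines _ => lines.length
decreasing_by
  · simp
  · exact Nat.lt_succ_of_le r1.2
  · simp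

def getCodeBlock_py_alt (linesIter : List String) : List String :=
  (blockB linesIter true).1.1

-- ===== PRECONDITION & SPEC =====
def Spec_getCodeBlock_py (linesIter : List String) (out : List String) : Prop := out = getCodeBlock_py_alt linesIter
instance (linesIter : List String) (out : List String) : Decidable (Spec_getCodeBlock_py linesIter out) := by unfold Spec_getCodeBlock_py; infer_instance

-- ===== CLAIM (what is proved, stated in full; the proofs are below) =====
def Claim_equal_getCodeBlock_py : Prop := ∀ (linesIter : List String), Dom_getCodeBlock_py linesIter → Spec_getCodeBlock_py linesIter (getCodeBlock_py linesIter)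

-- ===== LEMMAS AND PROOFS =====

-- upperChar sends no character into or out of Python's whitespace class
lemma isspace_upperChar (c : Char) : PySem.Chars.isspace (PySem.Chars.upperChar c) = PySem.Chars.isspace c := by
  unfold PySem.Chars.upperChar
  split
  · rename_i h
    unfold PySem.Chars.islower at h
    rw [Bool.and_eq_true, decide_eq_true_iff, decide_eq_true_iff] at h
    have h1' : 97 ≤ c.toNat := UInt32.le_iff_toNat_le.mp h.1
    have h2' : c.toNat ≤ 122 := UInt32.le_iff_toNat_le.mp h.2
    have hv : Nat.isValidChar (c.toNat - 32) := Or.inl (by omega)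
    have h32 : (Char.ofNat (c.toNat - 32)).toNat = c.toNat - 32 := by
      rw [Char.toNat_ofNat]; simp [hv]
    unfold PySem.Chars.isspace
    rw [Bool.eq_iff_iff]
    simp only [h32, Bool.or_eq_true, Bool.and_eq_true, decide_eq_true_iff]
    omega
  · rfl

lemma upper_isspace_fun : (PySem.Chars.isspace ∘ PySem.Chars.upperChar) = PySem.Chars.isspace :=
  funext fun c => isspace_upperChar c

lemma lstrip_upper (s : List Char) :
    PySem.Chars.lstrip (PySem.Chars.upper s) = PySem.Chars.upper (PySem.Chars.lstrip s) := by
  unfold PySem.Chars.lstrip PySem.Chars.upper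
  rw [List.dropWhile_map, upper_isspace_fun]

lemma rstrip_upper (s : List Char) :
    PySem.Chars.rstrip (PySem.Chars.upper s) = PySem.Chars.upper (PySem.Chars.rstrip s) := by
  unfold PySem.Chars.rstrip PySem.Chars.upper
  rw [← List.map_reverse, List.dropWhile_map, upper_isspace_fun, List.map_reverse]

lemma strip_upper (s : List Char) :
    PySem.Chars.strip (PySem.Chars.upper s) = PySem.Chars.upper (PySem.Chars.strip s) := by
  unfold PySem.Chars.strip
  rw [lstrip_upper, rstrip_upper]

lemma dw_idem (p : Char → Bool) (l : List Char) : (l.dropWhile p).dropWhile p = l.dropWhile p := by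
  induction l with
  | nil => rfl
  | cons a t ih =>
    by_cases h : p a
    · simp [h, ih]
    · simp [h]

lemma dw_prefix (p : Char → Bool) (l w : List Char) (hw : w <+: l.dropWhile p) :
    w.dropWhile p = w := by
  cases w with
  | nil => rfl
  | cons a t =>
    have hh : (l.dropWhile p).head? = some a := by
      obtain ⟨r, hr⟩ := hw
      rw [← hr]; rfl
    have hpa : p a = false := by
      have := List.head?_dropWhile_not p l
      rw [hh] at this
      simpa using this
    simp [hpa]

lemma rstrip_prefix (s : List Char) : PySem.Chars.rstrip s <+: s := by
  unfold PySem.Chars.rstrip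
  rw [← List.reverse_suffix]
  simpa using List.dropWhile_suffix _

lemma rstrip_idem (s : List Char) : PySem.Chars.rstrip (PySem.Chars.rstrip s) = PySem.Chars.rstrip s := by
  unfold PySem.Chars.rstrip
  rw [List.reverse_reverse, dw_idem]

lemma strip_idem (s : List Char) : PySem.Chars.strip (PySem.Chars.strip s) = PySem.Chars.strip s := by
  unfold PySem.Chars.strip
  have h1 : PySem.Chars.lstrip (PySem.Chars.rstrip (PySem.Chars.lstrip s)) = PySem.Chars.rstrip (PySem.Chars.lstrip s) := by
    unfold PySem.Chars.lstrip
    exact dw_prefix _ s _ (rstrip_prefix _)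
  rw [h1, rstrip_idem]

-- on an already-stripped line, A's strip inside _isCodeBlock is the identity
lemma strip_upper_strip (l : String) :
    PySem.Str.strip (PySem.Str.upper (PySem.Str.strip l)) = PySem.Str.upper (PySem.Str.strip l) := by
  apply String.toList_inj.mp
  simp only [PySem.Str.toList_strip, PySem.Str.toList_upper]
  rw [strip_upper, strip_idem]

-- so A's opener test on the stripped line equals B's
lemma isCodeBlock_strip (l : String) :
    isCodeBlock_py (PySem.Str.strip l)
      = (PySem.Str.startswith (PySem.Str.upper (PySem.Str.strip l)) "IF"
         || PySem.Str.startswith (PySem.Str.upper (PySem.Str.strip l)) "WHILE") := by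
  unfold isCodeBlock_py
  rw [strip_upper_strip]

-- the same statement in the Chars-level simp-normal form
lemma isCodeBlock_strip' (l : String) :
    isCodeBlock_py (PySem.Str.strip l)
      = (PySem.Chars.startswith (PySem.Chars.upper (PySem.Chars.strip l.toList)) ['I','F']
         || PySem.Chars.startswith (PySem.Chars.upper (PySem.Chars.strip l.toList)) ['W','H','I','L','E']) := by
  rw [isCodeBlock_strip]
  simp

-- Main simulation: A's depth-counter loop at depth 1 collects exactly B's top-level block,
-- and at depth d >= 2 it first collects a non-top block (END_ kept) and resumes at depth d-1.
lemma main_sim : ∀ (n : Nat) (lines : List String), lines.length ≤ n →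
    (∀ code : List String, getCodeBlockGo lines code 1 = code ++ (blockB lines true).1.1) ∧
    (∀ (code : List String) (d : Int), 2 ≤ d →
      getCodeBlockGo lines code d
        = getCodeBlockGo (blockB lines false).1.2 (code ++ (blockB lines false).1.1) (d - 1)) := by
  intro n
  induction n with
  | zero =>
    intro lines hlen
    have : lines = [] := List.length_eq_zero_iff.mp (Nat.le_zero.mp hlen)
    subst this
    constructor
    · intro code; simp [getCodeBlockGo, blockB]
    · intro code d _; simp [getCodeBlockGo, blockB]
  | succ n ih =>
    intro lines hlen
    cases lines with
    | nil =>
      constructor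
      · intro code; simp [getCodeBlockGo, blockB]
      · intro code d _; simp [getCodeBlockGo, blockB]
    | cons l rest =>
      have hrest : rest.length ≤ n := by
        simpa using Nat.lt_succ_iff.mp (Nat.lt_of_lt_of_le (by simp) hlen)
      by_cases hE : PySem.Chars.startswith (PySem.Chars.upper (PySem.Chars.strip l.toList)) ['E','N','D','_'] = true
      · constructor
        · intro code
          simp [getCodeBlockGo, blockB, hE]
        · intro code d hd
          have hne : ¬ (d - 1 ≤ 0) := by omega
          simp [getCodeBlockGo, blockB, hE, hne]
      · by_cases hC : (PySem.Chars.startswith (PySem.Chars.upper (PySem.Chars.strip l.toList)) ['I','F'] = true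
                       ∨ PySem.Chars.startswith (PySem.Chars.upper (PySem.Chars.strip l.toList)) ['W','H','I','L','E'] = true)
        · have hCB : isCodeBlock_py (PySem.Str.strip l) = true := by
            rw [isCodeBlock_strip']; rcases hC with h | h <;> simp [h]
          have hr1 : (blockB rest false).1.2.length ≤ n := Nat.le_trans (blockB rest false).2 hrest
          constructor
          · intro code
            have step1 := (ih rest hrest).2 (code ++ [PySem.Str.strip l]) 2 (by omega)
            have e21 : (2 : Int) - 1 = 1 := by norm_num
            rw [e21] at step1
            have step2 := (ih (blockB rest false).1.2 hr1).1
              ((code ++ [PySem.Str.strip l]) ++ (blockB rest false).1.1)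
            simp only [List.append_assoc, List.singleton_append] at step1 step2
            simp [getCodeBlockGo, blockB, hE, hC, hCB, step1, step2]
          · intro code d hd
            have step1 := (ih rest hrest).2 (code ++ [PySem.Str.strip l]) (d + 1) (by omega)
            have ed : d + 1 - 1 = d := by omega
            rw [ed] at step1
            have step2 := (ih (blockB rest false).1.2 hr1).2
              ((code ++ [PySem.Str.strip l]) ++ (blockB rest false).1.1) d hd
            have hne : ¬ (d + 1 ≤ 0) := by omega
            simp only [List.append_assoc, List.singleton_append] at step1 step2
            simp [getCodeBlockGo, blockB, hE, hC, hCB, hne, step1, step2]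
        · have hCB : isCodeBlock_py (PySem.Str.strip l) = false := by
            rw [isCodeBlock_strip']
            simpa using hC
          constructor
          · intro code
            have step1 := (ih rest hrest).1 (code ++ [PySem.Str.strip l])
            simp [getCodeBlockGo, blockB, hE, hC, hCB, step1]
          · intro code d hd
            have step1 := (ih rest hrest).2 (code ++ [PySem.Str.strip l]) d hd
            have hne : ¬ (d ≤ 0) := by omega
            simp [getCodeBlockGo, blockB, hE, hC, hCB, hne, step1]

-- ===== VERDICT (by name: the statement is the Claim_ definition above) =====
theorem getCodeBlock_py_spec : Claim_equal_getCodeBlock_py := by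
  intro lines _
  unfold Spec_getCodeBlock_py getCodeBlock_py getCodeBlock_py_alt
  simpa using (main_sim lines.length lines (le_refl _)).1 []
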